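-- pv_equiv track=rewrite | github.com/NickDee96/bravedemo | dataViz.py | getCountDict
-- ===== SOURCE A (Python) =====
-- def getCountDict(tfList,rawList):
--     countDict=dict()
--     for  i in tfList:
--         count=0
--         try:
--             for j in rawList:
--                 if i in j:
--                     count=count+1
--             countDict.update({
--                 i:count
--             })
--         except ValueError:
--             countDict.update({
--                 i:count
--             })
--     return countDict
-- ===== SOURCE B (Python) =====
-- def getCountDict(tfList, rawList):
--     # Substring-enumeration with a hash index: instead of scanning rawList once
--     # per term, enumerate each document's substrings of the relevant lengths
--     # once and look them up in a set of terms.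
--     terms = set(tfList)
--     lengths = {len(t) for t in tfList}
--     counts = dict.fromkeys(tfList, 0)
--     for j in rawList:
--         hits = set()
--         for L in lengths:
--             for k in range(len(j) - L + 1):
--                 sub = j[k:k + L]
--                 if sub in terms:
--                     hits.add(sub)
--         for s in hits:          # hits is a subset of counts' keys
--             counts[s] += 1
--     return counts
-- ===== Notes on version B (the rewrite author's own statement) =====
-- stated objective: alternative
-- what changed: B replaces A's per-term rescan of rawList by substring enumeration with a hash index: it builds a set of terms and the set of term lengths once, then for each document enumerates its substrings of those lengths, collects the terms that occur via set lookup, and increments a prebuilt term->count dict.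
import Mathlib
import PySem

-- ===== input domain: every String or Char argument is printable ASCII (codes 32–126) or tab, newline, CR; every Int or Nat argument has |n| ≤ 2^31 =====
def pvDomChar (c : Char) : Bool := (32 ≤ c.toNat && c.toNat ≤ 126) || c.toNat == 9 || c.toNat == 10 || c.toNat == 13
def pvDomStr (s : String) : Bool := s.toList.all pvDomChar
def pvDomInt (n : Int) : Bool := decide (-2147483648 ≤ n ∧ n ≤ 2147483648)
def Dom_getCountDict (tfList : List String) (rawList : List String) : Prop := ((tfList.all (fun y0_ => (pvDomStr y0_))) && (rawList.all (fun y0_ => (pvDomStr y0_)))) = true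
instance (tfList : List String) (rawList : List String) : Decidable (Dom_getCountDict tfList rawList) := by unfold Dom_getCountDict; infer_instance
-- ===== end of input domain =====

-- B counts by enumerating each document's substrings of the term lengths against a set of terms (alternative algorithm); return values proved equal.


-- ===== PORT A =====
-- for i in tfList: count = 0; for j in rawList: if i in j: count += 1; countDict.update({i: count})
-- (the try/except ValueError has identical bodies, so it is ported as the straight-line code)
def getCountDict (tfList : List String) (rawList : List String) : List (String × Int) :=
  (tfList.foldl
    (fun (d : PySem.Dict String Int) (i : String) =>
      d.insert i (rawList.foldl (fun (count : Int) (j : String) =>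
        if PySem.Str.isIn i j then count + 1 else count) 0))
    PySem.Dict.empty).items

-- ===== PORT B =====
-- inner loop 'for k in range(len(j)-L+1): sub = j[k:k+L]; if sub in terms: hits.add(sub)'
def pvHitsInner (terms : PySem.Set String) (j : String) (L : Int) (h : PySem.Set String) : PySem.Set String :=
  (PySem.List.pyRange 0 (PySem.Str.len j - L + 1) 1).foldl
    (fun (h : PySem.Set String) (k : Int) =>
      let sub := PySem.Str.slice j (some k) (some (k + L))
      if PySem.Set.contains terms sub then PySem.Set.add h sub else h) h

-- 'hits = set(); for L in lengths: <inner loop>'  (hits is consumed only as a set, so the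
-- iteration order of the Python set 'lengths' does not affect the result)
def pvHits (terms : PySem.Set String) (lengths : List Int) (j : String) : PySem.Set String :=
  lengths.foldl (fun h L => pvHitsInner terms j L h) PySem.Set.empty

-- terms = set(tfList); lengths = {len(t) for t in tfList}; counts = dict.fromkeys(tfList, 0);
-- for j in rawList: hits = …; for s in hits: counts[s] += 1
-- ('counts[s] += 1' is ported as modify: s ∈ hits is always a key of counts, so Python's
--  lookup never raises and modify's default is never used)
def getCountDict_alt (tfList : List String) (rawList : List String) : List (String × Int) :=
  let terms : PySem.Set String := PySem.Set.ofList tfList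
  let lengths : PySem.Set Int := PySem.Set.ofList (tfList.map PySem.Str.len)
  let counts0 : PySem.Dict String Int :=
    tfList.foldl (fun (d : PySem.Dict String Int) (i : String) => d.insert i 0) PySem.Dict.empty
  (rawList.foldl
    (fun (counts : PySem.Dict String Int) (j : String) =>
      (pvHits terms lengths j).foldl
        (fun (d : PySem.Dict String Int) (s : String) => d.modify s 0 (· + 1)) counts)
    counts0).items

-- ===== PRECONDITION & SPEC =====
def Spec_getCountDict (tfList : List String) (rawList : List String) (out : List (String × Int)) : Prop := out = getCountDict_alt tfList rawList
instance (tfList : List String) (rawList : List String) (out : List (String × Int)) : Decidable (Spec_getCountDict tfList rawList out) := by unfold Spec_getCountDict; infer_instance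

-- ===== CLAIM (what is proved, stated in full; the proofs are below) =====
def Claim_equal_getCountDict : Prop := ∀ (tfList : List String) (rawList : List String), Dom_getCountDict tfList rawList → Spec_getCountDict tfList rawList (getCountDict tfList rawList)

-- ===== LEMMAS AND PROOFS =====

-- membership in the guarded-add fold over any index list
theorem pv_mem_foldl_addIf (terms : PySem.Set String) (f : Int → String) :
    ∀ (ks : List Int) (h : PySem.Set String) (x : String),
    (x ∈ ks.foldl (fun (h : PySem.Set String) (k : Int) =>
        if PySem.Set.contains terms (f k) then PySem.Set.add h (f k) else h) h
      ↔ x ∈ h ∨ ∃ k ∈ ks, x = f k ∧ PySem.Set.contains terms x = true) := by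
  intro ks
  induction ks with
  | nil => intro h x; simp
  | cons k ks ih =>
    intro h x
    simp only [List.foldl_cons]
    rw [ih]
    by_cases hc : PySem.Set.contains terms (f k) = true
    · simp only [hc, if_pos, PySem.Set.mem_add]
      constructor
      · rintro ((hx | rfl) | ⟨k', hk', rfl, hcx⟩)
        · exact Or.inl hx
        · exact Or.inr ⟨k, List.mem_cons_self, rfl, hc⟩
        · exact Or.inr ⟨k', List.mem_cons_of_mem _ hk', rfl, hcx⟩
      · rintro (hx | ⟨k', hk', rfl, hcx⟩)
        · exact Or.inl (Or.inl hx)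
        · rcases List.mem_cons.mp hk' with rfl | hk'
          · exact Or.inl (Or.inr rfl)
          · exact Or.inr ⟨k', hk', rfl, hcx⟩
    · simp only [hc, if_neg, Bool.not_eq_true]
      constructor
      · rintro (hx | ⟨k', hk', rfl, hcx⟩)
        · exact Or.inl hx
        · exact Or.inr ⟨k', List.mem_cons_of_mem _ hk', rfl, hcx⟩
      · rintro (hx | ⟨k', hk', rfl, hcx⟩)
        · exact Or.inl hx
        · rcases List.mem_cons.mp hk' with rfl | hk'
          · exact absurd hcx hc
          · exact Or.inr ⟨k', hk', rfl, hcx⟩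

theorem pv_mem_hitsInner (terms : PySem.Set String) (j : String) (L : Int)
    (h : PySem.Set String) (x : String) :
    x ∈ pvHitsInner terms j L h ↔ x ∈ h ∨
      ∃ k : Int, 0 ≤ k ∧ k < PySem.Str.len j - L + 1 ∧
        x = PySem.Str.slice j (some k) (some (k + L)) ∧ PySem.Set.contains terms x = true := by
  unfold pvHitsInner
  rw [pv_mem_foldl_addIf terms (fun k => PySem.Str.slice j (some k) (some (k + L)))]
  simp only [PySem.List.mem_pyRange_one]
  constructor
  · rintro (hx | ⟨k, ⟨hk0, hkb⟩, rfl, hcx⟩)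
    · exact Or.inl hx
    · exact Or.inr ⟨k, hk0, hkb, rfl, hcx⟩
  · rintro (hx | ⟨k, hk0, hkb, rfl, hcx⟩)
    · exact Or.inl hx
    · exact Or.inr ⟨k, ⟨hk0, hkb⟩, rfl, hcx⟩

theorem pv_mem_hits_aux (terms : PySem.Set String) (j : String) :
    ∀ (ls : List Int) (h : PySem.Set String) (x : String),
    (x ∈ ls.foldl (fun h L => pvHitsInner terms j L h) h ↔ x ∈ h ∨
      ∃ L ∈ ls, ∃ k : Int, 0 ≤ k ∧ k < PySem.Str.len j - L + 1 ∧
        x = PySem.Str.slice j (some k) (some (k + L)) ∧ PySem.Set.contains terms x = true) := by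
  intro ls
  induction ls with
  | nil => intro h x; simp
  | cons L ls ih =>
    intro h x
    simp only [List.foldl_cons]
    rw [ih, pv_mem_hitsInner]
    constructor
    · rintro ((hx | ⟨k, hk0, hkb, rfl, hcx⟩) | ⟨L', hL', hrest⟩)
      · exact Or.inl hx
      · exact Or.inr ⟨L, List.mem_cons_self, k, hk0, hkb, rfl, hcx⟩
      · exact Or.inr ⟨L', List.mem_cons_of_mem _ hL', hrest⟩
    · rintro (hx | ⟨L', hL', hrest⟩)
      · exact Or.inl (Or.inl hx)
      · rcases List.mem_cons.mp hL' with rfl | hL'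
        · exact Or.inl (Or.inr hrest)
        · exact Or.inr ⟨L', hL', hrest⟩

theorem pv_mem_hits (terms : PySem.Set String) (lengths : List Int) (j : String) (x : String) :
    x ∈ pvHits terms lengths j ↔
      ∃ L ∈ lengths, ∃ k : Int, 0 ≤ k ∧ k < PySem.Str.len j - L + 1 ∧
        x = PySem.Str.slice j (some k) (some (k + L)) ∧ PySem.Set.contains terms x = true := by
  unfold pvHits
  rw [pv_mem_hits_aux]
  simp [PySem.Set.empty]

-- a slice with ordered nonnegative bounds is a substring
theorem pv_slice_infix (j : String) (a b : Int) :
    0 ≤ a → 0 ≤ b → PySem.Str.isIn (PySem.Str.slice j (some a) (some b)) j = true := by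
  intro hk hkl
  rw [PySem.Str.isIn_iff_infix, PySem.Str.toList_slice, PySem.Chars.slice_eq_listSlice,
    PySem.List.slice_toNat j.toList hk hkl]
  exact (List.take_prefix _ _).isInfix.trans (List.drop_suffix _ _).isInfix

-- the semantic characterisation: x lands in hits(j) iff x is a term occurring in j
theorem pv_hits_iff (tfList : List String) (j : String) (x : String) :
    x ∈ pvHits (PySem.Set.ofList tfList) (PySem.Set.ofList (tfList.map PySem.Str.len)) j ↔
      x ∈ tfList ∧ PySem.Str.isIn x j = true := by
  rw [pv_mem_hits]
  constructor
  · rintro ⟨L, hL, k, hk0, hkb, rfl, hcx⟩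
    refine ⟨(PySem.Set.mem_ofList _ _).mp ((PySem.Set.contains_iff _ _).mp hcx), ?_⟩
    have hL0 : 0 ≤ L := by
      rcases List.mem_map.mp ((PySem.Set.mem_ofList _ _).mp hL) with ⟨t, _, rfl⟩
      rw [PySem.Str.len_eq]; positivity
    exact pv_slice_infix j k (k + L) hk0 (by omega)
  · rintro ⟨hx, hin⟩
    rw [PySem.Str.isIn_eq, ← PySem.Chars.exists_prefix_drop_iff_isIn] at hin
    obtain ⟨d, hpre⟩ := hin
    -- normalise d so that d + |x| ≤ |j|
    obtain ⟨e, hpre', hle⟩ :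
        ∃ e, x.toList <+: j.toList.drop e ∧ e + x.toList.length ≤ j.toList.length := by
      have hlen := hpre.length_le
      rw [List.length_drop] at hlen
      by_cases hd : d ≤ j.toList.length
      · exact ⟨d, hpre, by omega⟩
      · have hnil : x.toList = [] := by
          have : x.toList.length = 0 := by omega
          exact List.eq_nil_of_length_eq_zero this
        exact ⟨0, by simp [hnil], by omega⟩
    refine ⟨PySem.Str.len x, ?_, (e : Int), by positivity, ?_, ?_, ?_⟩
    · exact (PySem.Set.mem_ofList _ _).mpr (List.mem_map.mpr ⟨x, hx, rfl⟩)
    · rw [PySem.Str.len_eq, PySem.Str.len_eq]; omega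
    · rw [← String.toList_inj, PySem.Str.toList_slice, PySem.Chars.slice_eq_listSlice,
        PySem.Str.len_eq, PySem.List.slice_natCast_add]
      exact List.prefix_iff_eq_take.mp hpre'
    · exact (PySem.Set.contains_iff _ _).mpr ((PySem.Set.mem_ofList _ _).mpr hx)

theorem pv_nodup_foldl_addIf (terms : PySem.Set String) (f : Int → String) :
    ∀ (ks : List Int) (h : PySem.Set String), h.Nodup →
    (ks.foldl (fun (h : PySem.Set String) (k : Int) =>
        if PySem.Set.contains terms (f k) then PySem.Set.add h (f k) else h) h).Nodup := by
  intro ks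
  induction ks with
  | nil => intro h hn; simpa using hn
  | cons k ks ih =>
    intro h hn
    simp only [List.foldl_cons]
    apply ih
    split
    · exact PySem.Set.nodup_add _ _ hn
    · exact hn

theorem pv_hits_nodup (terms : PySem.Set String) (lengths : List Int) (j : String) :
    (pvHits terms lengths j).Nodup := by
  unfold pvHits
  generalize hinit : (PySem.Set.empty : PySem.Set String) = h0
  have hn0 : h0.Nodup := by rw [← hinit]; exact List.nodup_nil
  clear hinit
  induction lengths generalizing h0 with
  | nil => simpa using hn0
  | cons L ls ih =>
    simp only [List.foldl_cons]
    exact ih _ (pv_nodup_foldl_addIf terms _ _ _ hn0)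

-- Set.update by elements already present is the identity
theorem pv_update_of_subset (s : PySem.Set String) :
    ∀ (hs : List String), (∀ x ∈ hs, x ∈ s) → PySem.Set.update s hs = s := by
  intro hs
  induction hs generalizing s with
  | nil => intro _; exact PySem.Set.update_nil s
  | cons x hs ih =>
    intro hsub
    rw [PySem.Set.update_cons, PySem.Set.add_of_mem (hsub x List.mem_cons_self)]
    exact ih s (fun y hy => hsub y (List.mem_cons_of_mem _ hy))

-- value of A's insert fold at a key (the inserted value depends only on the key)
theorem pvA_getD (c : String → Int) :
    ∀ (tf : List String) (d : PySem.Dict String Int) (i : String),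
    (tf.foldl (fun d i => d.insert i (c i)) d).getD i 0
      = if i ∈ tf then c i else d.getD i 0 := by
  intro tf
  induction tf with
  | nil => intro d i; simp
  | cons x xs ih =>
    intro d i
    simp only [List.foldl_cons]
    rw [ih, PySem.Dict.getD_insert]
    by_cases hx : i ∈ xs <;> by_cases he : i = x <;>
      simp [hx, he, List.mem_cons]

-- value of B's outer fold at a key: initial value plus the per-document hit counts
theorem pvB_getD (terms : PySem.Set String) (lengths : PySem.Set Int) :
    ∀ (raw : List String) (d : PySem.Dict String Int) (i : String),
    (raw.foldl
      (fun (counts : PySem.Dict String Int) (j : String) =>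
        (pvHits terms lengths j).foldl
          (fun (d : PySem.Dict String Int) (s : String) => d.modify s 0 (· + 1)) counts) d).getD i 0
      = d.getD i 0 + (raw.map (fun j => ((pvHits terms lengths j).count i : Int))).sum := by
  intro raw
  induction raw with
  | nil => intro d i; simp
  | cons j raw ih =>
    intro d i
    simp only [List.foldl_cons]
    rw [ih, PySem.Dict.getD_foldl_modify_add_one]
    simp only [List.map_cons, List.sum_cons]
    ring

-- keys of B's outer fold are unchanged
theorem pvB_keys (tfList : List String) :
    ∀ (raw : List String) (d : PySem.Dict String Int), d.keys = PySem.Set.ofList tfList →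
    (raw.foldl
      (fun (counts : PySem.Dict String Int) (j : String) =>
        (pvHits (PySem.Set.ofList tfList) (PySem.Set.ofList (tfList.map PySem.Str.len)) j).foldl
          (fun (d : PySem.Dict String Int) (s : String) => d.modify s 0 (· + 1)) counts) d).keys
      = PySem.Set.ofList tfList := by
  intro raw
  induction raw with
  | nil => intro d hd; simpa using hd
  | cons j raw ih =>
    intro d hd
    simp only [List.foldl_cons]
    apply ih
    rw [PySem.Dict.keys_foldl_modify, hd]
    apply pv_update_of_subset
    intro x hxmem
    exact (PySem.Set.mem_ofList _ _).mpr ((pv_hits_iff tfList j x).mp hxmem).1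

-- ===== VERDICT (by name: the statement is the Claim_ definition above) =====
theorem getCountDict_spec : Claim_equal_getCountDict := by
  intro tfList rawList _
  unfold Spec_getCountDict getCountDict getCountDict_alt
  simp only [PySem.List.foldl_if_add_one, zero_add]
  -- A's dict
  have keysA : (tfList.foldl
      (fun (d : PySem.Dict String Int) (i : String) =>
        d.insert i ((rawList.countP (fun j => PySem.Str.isIn i j) : Int))) PySem.Dict.empty).keys
      = PySem.Set.ofList tfList := by
    rw [PySem.Dict.keys_foldl_insert, PySem.Dict.keys_empty, PySem.Set.update_nil_left]
  have nodupA := keysA ▸ PySem.Set.nodup_ofList tfList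
  -- B's initial dict
  have keys0 : (tfList.foldl
      (fun (d : PySem.Dict String Int) (i : String) => d.insert i 0) PySem.Dict.empty).keys
      = PySem.Set.ofList tfList := by
    rw [PySem.Dict.keys_foldl_insert, PySem.Dict.keys_empty, PySem.Set.update_nil_left]
  have keysB := pvB_keys tfList rawList _ keys0
  have nodupB := keysB ▸ PySem.Set.nodup_ofList tfList
  rw [PySem.Dict.items_eq_map_keys _ nodupA 0, PySem.Dict.items_eq_map_keys _ nodupB 0,
    keysA, keysB]
  apply List.map_congr_left
  intro i hi
  have hitf : i ∈ tfList := (PySem.Set.mem_ofList _ _).mp hi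
  have hA : (tfList.foldl
      (fun (d : PySem.Dict String Int) (i : String) =>
        d.insert i ((rawList.countP (fun j => PySem.Str.isIn i j) : Int))) PySem.Dict.empty).getD i 0
      = (rawList.countP (fun j => PySem.Str.isIn i j) : Int) := by
    rw [pvA_getD]; simp [hitf]
  have h0 : (tfList.foldl
      (fun (d : PySem.Dict String Int) (i : String) => d.insert i 0) PySem.Dict.empty).getD i 0
      = (0 : Int) := by
    rw [pvA_getD (fun _ => (0 : Int))]; simp
  have hB : (rawList.foldl
      (fun (counts : PySem.Dict String Int) (j : String) =>
        (pvHits (PySem.Set.ofList tfList) (PySem.Set.ofList (tfList.map PySem.Str.len)) j).foldl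
          (fun (d : PySem.Dict String Int) (s : String) => d.modify s 0 (· + 1)) counts)
      (tfList.foldl (fun (d : PySem.Dict String Int) (i : String) => d.insert i 0)
        PySem.Dict.empty)).getD i 0
      = (rawList.countP (fun j => PySem.Str.isIn i j) : Int) := by
    rw [pvB_getD, h0, zero_add]
    have hmap : rawList.map (fun j =>
        (((pvHits (PySem.Set.ofList tfList) (PySem.Set.ofList (tfList.map PySem.Str.len)) j).count i : Int)))
        = rawList.map (fun j => if PySem.Str.isIn i j then (1 : Int) else 0) := by
      apply List.map_congr_left
      intro j _
      by_cases hj : PySem.Str.isIn i j = true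
      · rw [List.count_eq_one_of_mem (pv_hits_nodup _ _ _)
          ((pv_hits_iff tfList j i).mpr ⟨hitf, hj⟩), if_pos hj]
        norm_num
      · rw [List.count_eq_zero_of_not_mem
          (fun hmem => hj ((pv_hits_iff tfList j i).mp hmem).2), if_neg hj]
        norm_num
    rw [hmap, PySem.List.sum_map_ite_one_zero]
  rw [hA, hB]
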